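-- pv_equiv track=rewrite | github.com/KasselFelix/Python-Programming_element | TME6/TME6.py | liste_diviseurs_pairs
-- ===== SOURCE A (Python) =====
-- def liste_diviseurs_pairs(a):
--     """
--     int -> List[int]
--     a!=0
--     Retourne la liste des diviseurs pairs de a.
--     """
--
--     #L:List[int]
--     L=[]
--
--     #i:int
--     i=1
--
--     while i<=a:
--         if i%2==0 and a%i==0:
--             L.append(i)
--         i=i+1
--
--     return L
-- ===== SOURCE B (Python) =====
-- def liste_diviseurs_pairs(a):
--     # even divisors of a, ascending: trial division up to sqrt(a),
--     # collecting each divisor pair (i, a//i)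
--     small = []
--     large = []
--     i = 1
--     while i * i <= a:
--         if a % i == 0:
--             if i % 2 == 0:
--                 small.append(i)
--             q = a // i
--             if q != i and q % 2 == 0:
--                 large.append(q)
--         i = i + 1
--     large.reverse()
--     return small + large
-- ===== Notes on version B (the rewrite author's own statement) =====
-- stated objective: faster
-- what changed: Replaces the O(a) scan of every i in [1,a] by trial division up to sqrt(a) that collects each divisor pair (i, a//i) into an ascending 'small' list and a descending 'large' list, returning small + reversed(large).
import Mathlib
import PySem

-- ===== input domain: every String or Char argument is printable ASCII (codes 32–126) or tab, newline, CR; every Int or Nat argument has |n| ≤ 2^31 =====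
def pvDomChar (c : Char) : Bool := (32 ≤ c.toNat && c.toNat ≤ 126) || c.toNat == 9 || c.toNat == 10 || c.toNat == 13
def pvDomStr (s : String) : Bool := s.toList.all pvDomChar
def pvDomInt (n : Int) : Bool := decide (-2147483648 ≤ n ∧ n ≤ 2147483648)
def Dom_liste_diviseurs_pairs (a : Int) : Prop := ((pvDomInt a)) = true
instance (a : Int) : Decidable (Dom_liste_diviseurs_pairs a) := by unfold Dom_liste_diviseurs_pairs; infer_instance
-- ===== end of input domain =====

-- B replaces A's O(a) scan of 1..a by trial division up to √a collecting divisor pairs (faster, asymptotic).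

-- ===== PORT A =====
-- while i<=a: if i%2==0 and a%i==0: L.append(i); i=i+1   (fuel a.toNat covers all iterations)
def pvLoopA (a : Int) (i : Int) (L : List Int) : Nat → List Int
  | 0 => L
  | fuel+1 =>
    if i ≤ a then
      pvLoopA a (i+1)
        (if PySem.Int.mod i 2 = 0 ∧ PySem.Int.mod a i = 0 then L ++ [i] else L) fuel
    else L

def liste_diviseurs_pairs (a : Int) : List Int := pvLoopA a 1 [] a.toNat

-- ===== PORT B =====
-- while i*i<=a: if a%i==0: maybe append i to small, maybe append q=a//i to large; then small + reversed large
def pvLoopB (a : Int) (i : Int) (small large : List Int) : Nat → List Int × List Int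
  | 0 => (small, large)
  | fuel+1 =>
    if i * i ≤ a then
      if PySem.Int.mod a i = 0 then
        pvLoopB a (i+1)
          (if PySem.Int.mod i 2 = 0 then small ++ [i] else small)
          (if PySem.Int.floordiv a i ≠ i ∧ PySem.Int.mod (PySem.Int.floordiv a i) 2 = 0
            then large ++ [PySem.Int.floordiv a i] else large) fuel
      else pvLoopB a (i+1) small large fuel
    else (small, large)

def liste_diviseurs_pairs_alt (a : Int) : List Int :=
  let p := pvLoopB a 1 [] [] a.toNat
  p.1 ++ p.2.reverse

-- ===== PRECONDITION & SPEC =====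
def Spec_liste_diviseurs_pairs (a : Int) (out : List Int) : Prop := out = liste_diviseurs_pairs_alt a
instance (a : Int) (out : List Int) : Decidable (Spec_liste_diviseurs_pairs a out) := by unfold Spec_liste_diviseurs_pairs; infer_instance

-- ===== CLAIM (what is proved, stated in full; the proofs are below) =====
def Claim_equal_liste_diviseurs_pairs : Prop := ∀ (a : Int), Dom_liste_diviseurs_pairs a → Spec_liste_diviseurs_pairs a (liste_diviseurs_pairs a)

-- ===== LEMMAS AND PROOFS =====

-- the tail produced by A's loop from state (i, [])
def pvTailA (a i : Int) (f : Nat) : List Int := pvLoopA a i [] f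
-- the two tails produced by B's loop from state (i, [], [])
def pvTailB (a i : Int) (f : Nat) : List Int × List Int := pvLoopB a i [] [] f

theorem pvLoopA_append (a : Int) (f : Nat) : ∀ (i : Int) (L : List Int),
    pvLoopA a i L f = L ++ pvTailA a i f := by
  induction f with
  | zero => intro i L; simp [pvLoopA, pvTailA]
  | succ f ih =>
    intro i L
    simp only [pvLoopA, pvTailA]
    split_ifs with h1 h2
    · rw [ih, ih]; simp
    · rw [ih, ih]; simp
    · simp

theorem pvLoopB_append (a : Int) (f : Nat) : ∀ (i : Int) (sl ll : List Int),
    pvLoopB a i sl ll f = (sl ++ (pvTailB a i f).1, ll ++ (pvTailB a i f).2) := by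
  induction f with
  | zero => intro i sl ll; simp [pvLoopB, pvTailB]
  | succ f ih =>
    intro i sl ll
    simp only [pvLoopB, pvTailB]
    split_ifs with h1 h2 h3 h4 h5 <;> first
      | (rw [ih, ih]; simp)
      | simp

-- one unfolding step of A's tail
theorem pvTailA_succ (a i : Int) (f : Nat) :
    pvTailA a i (f+1) =
      if i ≤ a then
        (if PySem.Int.mod i 2 = 0 ∧ PySem.Int.mod a i = 0 then [i] else [])
          ++ pvTailA a (i+1) f
      else [] := by
  show pvLoopA a i [] (f+1) = _
  simp only [pvLoopA]
  split_ifs with h1 h2 <;> simp [pvLoopA_append]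

-- one unfolding step of B's tails
theorem pvTailB_fst_succ (a i : Int) (f : Nat) :
    (pvTailB a i (f+1)).1 =
      if i * i ≤ a then
        (if PySem.Int.mod a i = 0 ∧ PySem.Int.mod i 2 = 0 then [i] else [])
          ++ (pvTailB a (i+1) f).1
      else [] := by
  show (pvLoopB a i [] [] (f+1)).1 = _
  simp only [pvLoopB]
  split_ifs with h1 h2 h3 h4 h5 <;>
    simp_all [pvLoopB_append]

theorem pvTailB_snd_succ (a i : Int) (f : Nat) :
    (pvTailB a i (f+1)).2 =
      if i * i ≤ a then
        (if PySem.Int.mod a i = 0 ∧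
            (PySem.Int.floordiv a i ≠ i ∧ PySem.Int.mod (PySem.Int.floordiv a i) 2 = 0)
          then [PySem.Int.floordiv a i] else [])
          ++ (pvTailB a (i+1) f).2
      else [] := by
  show (pvLoopB a i [] [] (f+1)).2 = _
  simp only [pvLoopB]
  split_ifs with h1 h2 h3 h4 h5 <;>
    simp_all [pvLoopB_append]

theorem mem_pvTailA (a : Int) (f : Nat) : ∀ (i x : Int), a < i + f →
    (x ∈ pvTailA a i f ↔ i ≤ x ∧ x ≤ a ∧ (2 : Int) ∣ x ∧ x ∣ a) := by
  induction f with
  | zero =>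
    intro i x h
    refine iff_of_false List.not_mem_nil ?_
    push_cast at h
    rintro ⟨h1, h2, -⟩; omega
  | succ f ih =>
    intro i x h
    have hrec := ih (i+1) x (by push_cast at h ⊢; omega)
    rw [pvTailA_succ]
    split_ifs with h1 h2
    · obtain ⟨h2a, h2b⟩ := h2
      rw [PySem.Int.mod_eq_zero_iff_dvd] at h2a h2b
      rw [List.singleton_append, List.mem_cons, hrec]
      constructor
      · rintro (rfl | ⟨hx1, hx2, hx3, hx4⟩)
        · exact ⟨le_refl _, h1, h2a, h2b⟩
        · exact ⟨by omega, hx2, hx3, hx4⟩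
      · rintro ⟨hx1, hx2, hx3, hx4⟩
        by_cases hxi : x = i
        · exact Or.inl hxi
        · exact Or.inr ⟨by omega, hx2, hx3, hx4⟩
    · simp only [PySem.Int.mod_eq_zero_iff_dvd] at h2
      rw [List.nil_append, hrec]
      constructor
      · rintro ⟨hx1, hx2, hx3, hx4⟩; exact ⟨by omega, hx2, hx3, hx4⟩
      · rintro ⟨hx1, hx2, hx3, hx4⟩
        refine ⟨?_, hx2, hx3, hx4⟩
        rcases eq_or_lt_of_le hx1 with h' | h'
        · subst h'; exact absurd ⟨hx3, hx4⟩ h2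
        · omega
    · refine iff_of_false List.not_mem_nil ?_
      rintro ⟨hx1, hx2, -⟩; omega

theorem pairwise_pvTailA (a : Int) (f : Nat) : ∀ (i : Int),
    (∀ x ∈ pvTailA a i f, i ≤ x) ∧ (pvTailA a i f).Pairwise (· < ·) := by
  induction f with
  | zero => intro i; simp [pvTailA, pvLoopA]
  | succ f ih =>
    intro i
    obtain ⟨ihlb, ihpw⟩ := ih (i+1)
    rw [pvTailA_succ]
    split_ifs with h1 h2
    · rw [List.singleton_append]
      refine ⟨?_, ?_⟩
      · intro x hx
        rcases List.mem_cons.mp hx with rfl | hx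
        · exact le_refl _
        · have := ihlb x hx; omega
      · rw [List.pairwise_cons]
        exact ⟨fun x hx => by have := ihlb x hx; omega, ihpw⟩
    · rw [List.nil_append]
      exact ⟨fun x hx => by have := ihlb x hx; omega, ihpw⟩
    · simp

theorem mem_pvTailB_fst (a : Int) (f : Nat) : ∀ (i x : Int), 1 ≤ i → a < i + f →
    (x ∈ (pvTailB a i f).1 ↔ i ≤ x ∧ x * x ≤ a ∧ (2 : Int) ∣ x ∧ x ∣ a) := by
  induction f with
  | zero =>
    intro i x hi h
    refine iff_of_false List.not_mem_nil ?_
    push_cast at h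
    rintro ⟨h1, h2, -⟩
    nlinarith
  | succ f ih =>
    intro i x hi h
    have hrec := ih (i+1) x (by omega) (by push_cast at h ⊢; omega)
    rw [pvTailB_fst_succ]
    split_ifs with h1 h2
    · obtain ⟨h2a, h2b⟩ := h2
      rw [PySem.Int.mod_eq_zero_iff_dvd] at h2a h2b
      rw [List.singleton_append, List.mem_cons, hrec]
      constructor
      · rintro (rfl | ⟨hx1, hx2, hx3, hx4⟩)
        · exact ⟨le_refl _, h1, h2b, h2a⟩
        · exact ⟨by omega, hx2, hx3, hx4⟩
      · rintro ⟨hx1, hx2, hx3, hx4⟩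
        by_cases hxi : x = i
        · exact Or.inl hxi
        · exact Or.inr ⟨by omega, hx2, hx3, hx4⟩
    · rw [List.nil_append, hrec]
      simp only [PySem.Int.mod_eq_zero_iff_dvd, not_and_or] at h2
      constructor
      · rintro ⟨hx1, hx2, hx3, hx4⟩; exact ⟨by omega, hx2, hx3, hx4⟩
      · rintro ⟨hx1, hx2, hx3, hx4⟩
        refine ⟨?_, hx2, hx3, hx4⟩
        rcases eq_or_lt_of_le hx1 with h' | h'
        · subst h'
          rcases h2 with h2 | h2
          · exact absurd hx4 h2
          · exact absurd hx3 h2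
        · omega
    · refine iff_of_false List.not_mem_nil ?_
      rintro ⟨hx1, hx2, -⟩
      nlinarith

theorem mem_pvTailB_snd (a : Int) (f : Nat) : ∀ (i x : Int), 1 ≤ i → a < i + f →
    (x ∈ (pvTailB a i f).2 ↔
      ∃ d, i ≤ d ∧ d * d ≤ a ∧ d * x = a ∧ x ≠ d ∧ (2 : Int) ∣ x) := by
  induction f with
  | zero =>
    intro i x hi h
    refine iff_of_false List.not_mem_nil ?_
    push_cast at h
    rintro ⟨d, h1, h2, -⟩
    nlinarith
  | succ f ih =>
    intro i x hi h
    have hrec := ih (i+1) x (by omega) (by push_cast at h ⊢; omega)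
    have hi0 : (0:Int) < i := by omega
    rw [pvTailB_snd_succ]
    split_ifs with h1 h2
    · -- i divides a and q = a//i accepted
      obtain ⟨h2a, h2b, h2c⟩ := h2
      rw [PySem.Int.mod_eq_zero_iff_dvd] at h2a h2c
      have hq : i * PySem.Int.floordiv a i = a := by
        rw [PySem.Int.floordiv_eq_ediv_of_pos hi0]
        exact Int.mul_ediv_cancel' h2a
      rw [List.singleton_append, List.mem_cons, hrec]
      constructor
      · rintro (rfl | ⟨d, hd1, hd2, hd3, hd4, hd5⟩)
        · exact ⟨i, le_refl _, h1, hq, h2b, h2c⟩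
        · exact ⟨d, by omega, hd2, hd3, hd4, hd5⟩
      · rintro ⟨d, hd1, hd2, hd3, hd4, hd5⟩
        rcases eq_or_lt_of_le hd1 with h' | h'
        · left
          subst h'
          exact mul_left_cancel₀ (show (i:Int) ≠ 0 by omega) (by rw [hd3]; exact hq.symm)
        · exact Or.inr ⟨d, by omega, hd2, hd3, hd4, hd5⟩
    · -- i*i ≤ a but pair rejected at i
      rw [List.nil_append, hrec]
      constructor
      · rintro ⟨d, hd1, hd2, hd3, hd4, hd5⟩
        exact ⟨d, by omega, hd2, hd3, hd4, hd5⟩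
      · rintro ⟨d, hd1, hd2, hd3, hd4, hd5⟩
        rcases eq_or_lt_of_le hd1 with h' | h'
        · exfalso
          subst h'
          have hdvd : i ∣ a := ⟨x, hd3.symm⟩
          have hq : i * PySem.Int.floordiv a i = a := by
            rw [PySem.Int.floordiv_eq_ediv_of_pos hi0]
            exact Int.mul_ediv_cancel' hdvd
          have hxq : x = PySem.Int.floordiv a i :=
            mul_left_cancel₀ (show (i:Int) ≠ 0 by omega) (by rw [hd3]; exact hq.symm)
          rw [not_and_or] at h2
          rcases h2 with h2 | h2
          · rw [PySem.Int.mod_eq_zero_iff_dvd] at h2; exact h2 hdvd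
          · rw [not_and_or] at h2
            rcases h2 with h2 | h2
            · rw [not_not] at h2; exact hd4 (hxq.trans h2)
            · rw [PySem.Int.mod_eq_zero_iff_dvd] at h2; exact h2 (hxq ▸ hd5)
        · exact ⟨d, by omega, hd2, hd3, hd4, hd5⟩
    · refine iff_of_false List.not_mem_nil ?_
      rintro ⟨d, hd1, hd2, -⟩
      nlinarith

theorem pairwise_pvTailB_fst (a : Int) (f : Nat) : ∀ (i : Int),
    (∀ x ∈ (pvTailB a i f).1, i ≤ x) ∧ ((pvTailB a i f).1).Pairwise (· < ·) := by
  induction f with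
  | zero => intro i; simp [pvTailB, pvLoopB]
  | succ f ih =>
    intro i
    obtain ⟨ihlb, ihpw⟩ := ih (i+1)
    rw [pvTailB_fst_succ]
    split_ifs with h1 h2
    · rw [List.singleton_append]
      refine ⟨?_, ?_⟩
      · intro x hx
        rcases List.mem_cons.mp hx with rfl | hx
        · exact le_refl _
        · have := ihlb x hx; omega
      · rw [List.pairwise_cons]
        exact ⟨fun x hx => by have := ihlb x hx; omega, ihpw⟩
    · rw [List.nil_append]
      exact ⟨fun x hx => by have := ihlb x hx; omega, ihpw⟩
    · simp

theorem pairwise_pvTailB_snd (a : Int) (f : Nat) : ∀ (i : Int), 1 ≤ i → a < i + f →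
    ((pvTailB a i f).2).Pairwise (· > ·) := by
  induction f with
  | zero => intro i _ _; simp [pvTailB, pvLoopB]
  | succ f ih =>
    intro i hi h
    have hle : a < (i+1) + (f : Int) := by push_cast at h ⊢; omega
    have ihpw := ih (i+1) (by omega) (by omega)
    have hi0 : (0:Int) < i := by omega
    rw [pvTailB_snd_succ]
    split_ifs with h1 h2
    · obtain ⟨h2a, -, -⟩ := h2
      rw [PySem.Int.mod_eq_zero_iff_dvd] at h2a
      have hq : i * PySem.Int.floordiv a i = a := by
        rw [PySem.Int.floordiv_eq_ediv_of_pos hi0]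
        exact Int.mul_ediv_cancel' h2a
      rw [List.singleton_append, List.pairwise_cons]
      refine ⟨?_, ihpw⟩
      intro x hx
      rw [mem_pvTailB_snd a f (i+1) x (by omega) (by omega)] at hx
      obtain ⟨d, hd1, hd2, hd3, hd4, hd5⟩ := hx
      have hx1 : 1 ≤ x := by nlinarith
      show x < PySem.Int.floordiv a i
      nlinarith [hq, hd3,
        mul_nonneg (by linarith : (0:Int) ≤ d - i - 1) (by linarith : (0:Int) ≤ x)]
    · rw [List.nil_append]; exact ihpw
    · simp

-- full membership characterisation of B's output, a ≥ 1
theorem mem_alt (a x : Int) (ha : 1 ≤ a) :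
    x ∈ liste_diviseurs_pairs_alt a ↔ 1 ≤ x ∧ x ≤ a ∧ (2 : Int) ∣ x ∧ x ∣ a := by
  have hf : a < 1 + ((a.toNat : Nat) : Int) := by omega
  simp only [liste_diviseurs_pairs_alt, List.mem_append, List.mem_reverse]
  rw [show pvLoopB a 1 [] [] a.toNat = pvTailB a 1 a.toNat from rfl]
  rw [mem_pvTailB_fst a a.toNat 1 x le_rfl hf, mem_pvTailB_snd a a.toNat 1 x le_rfl hf]
  constructor
  · rintro (⟨hx1, hx2, hx3, hx4⟩ | ⟨d, hd1, hd2, hd3, hd4, hd5⟩)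
    · refine ⟨hx1, ?_, hx3, hx4⟩; nlinarith
    · have hx1 : 1 ≤ x := by nlinarith
      refine ⟨hx1, ?_, hd5, ⟨d, by linarith [hd3, mul_comm d x]⟩⟩
      nlinarith
  · rintro ⟨hx1, hx2, hx3, hx4⟩
    by_cases hxx : x * x ≤ a
    · exact Or.inl ⟨hx1, hxx, hx3, hx4⟩
    · right
      obtain ⟨d, hd⟩ := hx4
      have hd1 : 1 ≤ d := by nlinarith
      refine ⟨d, hd1, ?_, by linarith [hd, mul_comm x d], ?_, hx3⟩
      · nlinarith
      · intro hxd; rw [hxd] at hd; nlinarith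

-- B's output is strictly increasing, a ≥ 1
theorem pairwise_alt (a : Int) (ha : 1 ≤ a) :
    (liste_diviseurs_pairs_alt a).Pairwise (· < ·) := by
  have hf : a < 1 + ((a.toNat : Nat) : Int) := by omega
  simp only [liste_diviseurs_pairs_alt]
  rw [show pvLoopB a 1 [] [] a.toNat = pvTailB a 1 a.toNat from rfl]
  rw [List.pairwise_append]
  refine ⟨(pairwise_pvTailB_fst a a.toNat 1).2, ?_, ?_⟩
  · rw [List.pairwise_reverse]
    exact pairwise_pvTailB_snd a a.toNat 1 le_rfl hf
  · intro s hs t ht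
    rw [List.mem_reverse] at ht
    rw [mem_pvTailB_fst a a.toNat 1 s le_rfl hf] at hs
    rw [mem_pvTailB_snd a a.toNat 1 t le_rfl hf] at ht
    obtain ⟨hs1, hs2, -, -⟩ := hs
    obtain ⟨d, hd1, hd2, hd3, hd4, -⟩ := ht
    have ht1 : 1 ≤ t := by nlinarith
    by_contra hc
    push Not at hc
    -- hc : t ≤ s; but every large element t has t*t > a while s*s ≤ a
    have hdt : d ≤ t := by
      by_contra hcon
      push Not at hcon
      nlinarith
    have hlt : d < t := lt_of_le_of_ne hdt (Ne.symm hd4)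
    have h1 : a < t * t := by nlinarith
    have h2 : t * t ≤ s * s := mul_le_mul hc hc (by linarith) (by linarith)
    linarith

-- A's output characterised
theorem mem_A (a x : Int) (ha : 1 ≤ a) :
    x ∈ liste_diviseurs_pairs a ↔ 1 ≤ x ∧ x ≤ a ∧ (2 : Int) ∣ x ∧ x ∣ a := by
  have hf : a < 1 + ((a.toNat : Nat) : Int) := by omega
  exact mem_pvTailA a a.toNat 1 x hf

theorem pairwise_A (a : Int) : (liste_diviseurs_pairs a).Pairwise (· < ·) :=
  (pairwise_pvTailA a a.toNat 1).2

-- ===== VERDICT (by name: the statement is the Claim_ definition above) =====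
theorem liste_diviseurs_pairs_spec : Claim_equal_liste_diviseurs_pairs := by
  intro a _
  unfold Spec_liste_diviseurs_pairs
  by_cases ha : 1 ≤ a
  · have hA := pairwise_A a
    have hB := pairwise_alt a ha
    have hmem : ∀ x, x ∈ liste_diviseurs_pairs_alt a ↔ x ∈ liste_diviseurs_pairs a := by
      intro x; rw [mem_alt a x ha, mem_A a x ha]
    have hperm : (liste_diviseurs_pairs_alt a).Perm (liste_diviseurs_pairs a) := by
      rw [List.perm_ext_iff_of_nodup (hB.imp ne_of_lt) (hA.imp ne_of_lt)]
      exact hmem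
    have e1 := PySem.List.sorted_eq_of_perm_of_pairwise_lt
      (xs := liste_diviseurs_pairs a) (ys := liste_diviseurs_pairs a)
      (key := fun x => x) (List.Perm.refl _) hA
    have e2 := PySem.List.sorted_eq_of_perm_of_pairwise_lt
      (xs := liste_diviseurs_pairs a) (ys := liste_diviseurs_pairs_alt a)
      (key := fun x => x) hperm hB
    rw [← e1, e2]
  · have h0 : a.toNat = 0 := by omega
    simp [liste_diviseurs_pairs, liste_diviseurs_pairs_alt, h0, pvLoopA, pvLoopB]
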